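-- pv_equiv track=rewrite | github.com/kirill-kondrashov/lean-misc | tools/problem1_odd_profile_search.py | upper_shadow_of_uniform_middle_family
-- ===== SOURCE A (Python) =====
-- from typing import Dict, Iterable, List, Sequence, Set, Tuple
--
-- def subset_cardinality(mask: int) -> int:
--     return mask.bit_count()
--
-- def upper_shadow_of_uniform_middle_family(
--     upper_family: Sequence[int], subsets: Sequence[int]
-- ) -> Tuple[int, ...]:
--     if not upper_family:
--         return ()
--     upper_family_set = set(upper_family)
--     ambient_rank = subset_cardinality(upper_family[0])
--     target_rank = ambient_rank + 1
--     shadow = [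
--         subset
--         for subset in subsets
--         if subset_cardinality(subset) == target_rank
--         and any((member & subset) == member for member in upper_family_set)
--     ]
--     return tuple(sorted(shadow))
-- ===== SOURCE B (Python) =====
-- def upper_shadow_of_uniform_middle_family(upper_family, subsets):
--     if not upper_family:
--         return ()
--     members = set(upper_family)
--     target_rank = upper_family[0].bit_count() + 1
--     counts = {}
--     for s in subsets:
--         counts[s] = counts.get(s, 0) + 1
--     result = []
--     for v in sorted(counts):
--         if v.bit_count() == target_rank and any((m & v) == m for m in members):
--             result.extend([v] * counts[v])
--     return tuple(result)
-- ===== Notes on version B (the rewrite author's own statement) =====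
-- stated objective: alternative
-- what changed: A filters every subset occurrence (scanning the family per occurrence) and then sorts the whole filtered list; B builds a value->count histogram in one pass, evaluates the rank-and-superset predicate once per distinct value, sorts only the distinct keys and expands each qualifying key by its multiplicity.
import Mathlib
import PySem

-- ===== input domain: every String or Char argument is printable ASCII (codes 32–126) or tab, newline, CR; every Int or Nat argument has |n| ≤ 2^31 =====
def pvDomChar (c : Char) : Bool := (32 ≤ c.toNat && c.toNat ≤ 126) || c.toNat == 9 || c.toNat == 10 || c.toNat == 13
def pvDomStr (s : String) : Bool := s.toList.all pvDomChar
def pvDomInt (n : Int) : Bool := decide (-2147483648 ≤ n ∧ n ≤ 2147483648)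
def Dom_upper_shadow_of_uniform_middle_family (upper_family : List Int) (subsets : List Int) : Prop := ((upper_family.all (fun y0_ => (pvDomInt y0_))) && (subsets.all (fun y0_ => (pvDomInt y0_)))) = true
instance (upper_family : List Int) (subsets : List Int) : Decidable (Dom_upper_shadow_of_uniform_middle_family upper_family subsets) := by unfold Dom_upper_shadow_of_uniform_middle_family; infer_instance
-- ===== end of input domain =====

-- B replaces A's filter-every-subset-then-sort-everything pass by a value histogram:
-- count duplicates once, test the predicate once per DISTINCT value, sort only the
-- distinct keys and expand each qualifying key by its multiplicity (objective: alternative).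

-- ===== PORT A =====
def upper_shadow_of_uniform_middle_family (upper_family : List Int) (subsets : List Int) : List Int :=
  if upper_family = [] then []
  else
    let upper_family_set : PySem.Set Int := PySem.Set.ofList upper_family
    let target_rank : Nat := PySem.Int.bitCount upper_family.headI + 1
    let shadow : List Int := subsets.filter (fun s =>
      PySem.Int.bitCount s == target_rank &&
      upper_family_set.any (fun m => PySem.Int.band m s == m))
    PySem.List.sorted shadow (fun x => x) false

-- ===== PORT B =====
def upper_shadow_of_uniform_middle_family_alt (upper_family : List Int) (subsets : List Int) : List Int :=
  if upper_family = [] then []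
  else
    let members : PySem.Set Int := PySem.Set.ofList upper_family
    let target_rank : Nat := PySem.Int.bitCount upper_family.headI + 1
    let counts : PySem.Dict Int Int :=
      subsets.foldl (fun d s => d.insert s (d.getD s 0 + 1)) PySem.Dict.empty
    (PySem.List.sorted counts.keys (fun x => x) false).foldl
      (fun result v =>
        if PySem.Int.bitCount v == target_rank &&
           members.any (fun m => PySem.Int.band m v == m)
        then result ++ PySem.List.pyRepeat [v] (counts.getD v 0)
        else result) []

-- ===== PRECONDITION & SPEC =====
def Spec_upper_shadow_of_uniform_middle_family (upper_family : List Int) (subsets : List Int) (out : List Int) : Prop := out = upper_shadow_of_uniform_middle_family_alt upper_family subsets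
instance (upper_family : List Int) (subsets : List Int) (out : List Int) : Decidable (Spec_upper_shadow_of_uniform_middle_family upper_family subsets out) := by unfold Spec_upper_shadow_of_uniform_middle_family; infer_instance

-- ===== CLAIM (what is proved, stated in full; the proofs are below) =====
def Claim_equal_upper_shadow_of_uniform_middle_family : Prop := ∀ (upper_family : List Int) (subsets : List Int), Dom_upper_shadow_of_uniform_middle_family upper_family subsets → Spec_upper_shadow_of_uniform_middle_family upper_family subsets (upper_shadow_of_uniform_middle_family upper_family subsets)

-- ===== LEMMAS AND PROOFS =====

-- counting in a flatMap of per-value blocks over a Nodup key list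
lemma pv_count_flatMap_blocks (a : Int) (p : Int → Bool) (c : Int → Nat) :
    ∀ ks : List Int, ks.Nodup →
      ((ks.flatMap (fun v => if p v then List.replicate (c v) v else [])).count a)
        = if a ∈ ks ∧ p a then c a else 0 := by
  intro ks hnd
  induction ks with
  | nil => simp
  | cons k t ih =>
    have hnd' := hnd
    rw [List.nodup_cons] at hnd'
    rw [List.flatMap_cons, List.count_append, ih hnd'.2]
    by_cases hak : a = k
    · subst hak
      have hat : a ∉ t := hnd'.1
      by_cases hp : p a
      · simp [hp, hat]
      · simp [hp, hat]
    · have hz : List.count a (if p k = true then List.replicate (c k) k else []) = 0 := by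
        split
        · simp [List.count_replicate]
          exact fun h => absurd h (Ne.symm hak)
        · simp
      rw [hz]
      by_cases hp : p a <;> by_cases hat : a ∈ t <;> simp [hak, hp, hat]

-- the expanded blocks of a strictly increasing key list are sorted (≤)
lemma pv_pairwise_le_flatMap (p : Int → Bool) (c : Int → Nat) :
    ∀ ks : List Int, ks.Pairwise (· < ·) →
      (ks.flatMap (fun v => if p v then List.replicate (c v) v else [])).Pairwise (· ≤ ·) := by
  intro ks hks
  induction ks with
  | nil => simp
  | cons k t ih =>
    rw [List.pairwise_cons] at hks
    rw [List.flatMap_cons]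
    apply List.pairwise_append.mpr
    refine ⟨?_, ih hks.2, ?_⟩
    · by_cases hp : p k
      · simp only [hp, if_true]
        apply List.pairwise_replicate.mpr
        simp
      · simp [hp]
    · intro x hx y hy
      have hxk : x = k := by
        by_cases hp : p k
        · simp only [hp, if_true] at hx; exact (List.eq_of_mem_replicate hx)
        · simp [hp] at hx
      obtain ⟨v, hv, hyv⟩ := List.mem_flatMap.mp hy
      have hyv' : y = v := by
        by_cases hpv : p v
        · simp only [hpv, if_true] at hyv; exact (List.eq_of_mem_replicate hyv)
        · simp [hpv] at hyv
      rw [hxk, hyv']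
      exact le_of_lt (hks.1 v hv)

-- core: sorting the filtered list = expanding the sorted distinct qualifying values by multiplicity
lemma pv_sorted_filter_eq_flatMap (xs : List Int) (p : Int → Bool) :
    PySem.List.sorted (xs.filter p) (fun x => x) false
      = (PySem.List.sorted (PySem.Set.ofList xs) (fun x => x) false).flatMap
          (fun v => if p v then List.replicate (xs.count v) v else []) := by
  set ks := PySem.List.sorted (PySem.Set.ofList xs) (fun x => x) false with hks
  have hperm : ks.Perm (PySem.Set.ofList xs) := PySem.List.sorted_perm _ _ _
  have hnd : ks.Nodup := hperm.nodup_iff.mpr (PySem.Set.nodup_ofList xs)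
  have hlt : ks.Pairwise (· < ·) := PySem.List.sorted_ofList_pairwise_lt xs
  apply PySem.List.sorted_id_eq_of_perm_of_pairwise
  · apply List.perm_iff_count.mpr
    intro a
    rw [pv_count_flatMap_blocks a p (fun v => xs.count v) ks hnd]
    have hmem : a ∈ ks ↔ a ∈ xs := by
      rw [hks, PySem.List.mem_sorted, PySem.Set.mem_ofList]
    by_cases hp : p a
    · by_cases hax : a ∈ xs
      · simp [hmem.mpr hax, List.count_filter, hp]
      · have h0 : (xs.filter p).count a = 0 := by
          apply List.count_eq_zero.mpr
          intro h
          exact hax (List.mem_of_mem_filter h)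
        have hk : a ∉ ks := fun h => hax (hmem.mp h)
        simp [hk, h0]
    · have : (xs.filter p).count a = 0 := by
        apply List.count_eq_zero.mpr
        intro h
        exact hp (List.of_mem_filter h)
      simp [this, hp]
  · exact pv_pairwise_le_flatMap p (fun v => xs.count v) ks hlt

-- ===== VERDICT (by name: the statement is the Claim_ definition above) =====
theorem upper_shadow_of_uniform_middle_family_spec : Claim_equal_upper_shadow_of_uniform_middle_family := by
  intro upper_family subsets _
  unfold Spec_upper_shadow_of_uniform_middle_family
  unfold upper_shadow_of_uniform_middle_family upper_shadow_of_uniform_middle_family_alt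
  by_cases h : upper_family = []
  · simp [h]
  · simp only [h, if_false]
    rw [PySem.Dict.foldl_insert_getD_add_one_eq_counter]
    rw [PySem.List.foldl_congr_mem
      (g := fun (result : List Int) v =>
        result ++ (if PySem.Int.bitCount v == PySem.Int.bitCount upper_family.headI + 1 &&
             (PySem.Set.ofList upper_family).any (fun m => PySem.Int.band m v == m)
           then List.replicate (subsets.count v) v else []))]
    · rw [PySem.List.foldl_append_eq_flatMap, List.nil_append,
        PySem.Dict.keys_counter]
      exact pv_sorted_filter_eq_flatMap subsets _
    · intro acc v _
      rw [PySem.Dict.getD_counter, PySem.List.pyRepeat_singleton, Int.toNat_natCast]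
      split <;> simp
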